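-- pv_equiv track=rewrite | github.com/sammcheng/aws.2 | utils/streaming_llm.py | _parse_improvements
-- ===== SOURCE A (Python) =====
-- from typing import Dict, Any, List, Generator, Optional
--
-- def _parse_improvements(text: str) -> List[Dict[str, Any]]:
--     """Parse improvements from text."""
--     # Simple parsing - in production, use more sophisticated parsing
--     improvements = []
--     lines = text.split('\n')
--
--     current_imp = {}
--     for line in lines:
--         line = line.strip()
--         if line.startswith('- Title:'):
--             if current_imp:
--                 improvements.append(current_imp)
--             current_imp = {'title': line.replace('- Title:', '').strip()}
--         elif line.startswith('- Description:'):
--             current_imp['description'] = line.replace('- Description:', '').strip()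
--         elif line.startswith('- Difficulty:'):
--             current_imp['implementation_difficulty'] = line.replace('- Difficulty:', '').strip()
--         elif line.startswith('- Category:'):
--             current_imp['category'] = line.replace('- Category:', '').strip()
--         elif line.startswith('- Impact:'):
--             current_imp['estimated_impact'] = line.replace('- Impact:', '').strip()
--
--     if current_imp:
--         improvements.append(current_imp)
--
--     return improvements
-- ===== SOURCE B (Python) =====
-- def _parse_improvements(text):
--     """Parse improvements from text (group-then-build decomposition)."""
--     FIELDS = (('- Title:', 'title'),
--               ('- Description:', 'description'),
--               ('- Difficulty:', 'implementation_difficulty'),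
--               ('- Category:', 'category'),
--               ('- Impact:', 'estimated_impact'))
--
--     def build(group):
--         d = {}
--         for line in group:
--             for prefix, key in FIELDS:
--                 if line.startswith(prefix):
--                     d[key] = line.replace(prefix, '').strip()
--                     break
--         return d
--
--     # Partition the stripped lines into groups: a new group starts at every
--     # '- Title:' line; lines before the first title form the leading group.
--     groups = [[]]
--     for raw in text.split('\n'):
--         line = raw.strip()
--         if line.startswith('- Title:'):
--             groups.append([])
--         groups[-1].append(line)
--
--     lead = build(groups[0])
--     records = [lead] if lead else []
--     records.extend(build(g) for g in groups[1:])
--     return records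
-- ===== Notes on version B (the rewrite author's own statement) =====
-- stated objective: alternative
-- what changed: A is a single stateful pass that mutates a current-record dict and flushes it at each title; B first partitions the stripped lines into groups (a new group at every '- Title:' line, lines before the first title forming a leading group) and then independently builds each group's dict via a prefix->key table, emitting the leading group only when it yielded fields.
import Mathlib
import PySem

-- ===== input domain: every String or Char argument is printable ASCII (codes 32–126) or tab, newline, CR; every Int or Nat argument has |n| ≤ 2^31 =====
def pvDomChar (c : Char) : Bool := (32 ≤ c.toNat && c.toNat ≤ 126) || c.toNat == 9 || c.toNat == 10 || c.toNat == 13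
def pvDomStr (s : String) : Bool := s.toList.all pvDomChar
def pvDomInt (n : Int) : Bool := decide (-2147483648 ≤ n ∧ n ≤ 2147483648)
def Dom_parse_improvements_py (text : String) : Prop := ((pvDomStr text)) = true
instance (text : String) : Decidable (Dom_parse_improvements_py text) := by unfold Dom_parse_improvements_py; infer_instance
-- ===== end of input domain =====

-- B re-decomposes A's single stateful pass as "partition lines into title-started groups, then build each group's dict"; equal return value proved on all of Dom.

-- ===== PORT A =====
-- A's loop body: strip the line, then the elif chain over the five prefixes.
def pvAStep (st : List (PySem.Dict String String) × PySem.Dict String String) (raw : String) :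
    List (PySem.Dict String String) × PySem.Dict String String :=
  let line := PySem.Str.strip raw
  if PySem.Str.startswith line "- Title:" then
    ((if st.2.items = [] then st.1 else st.1 ++ [st.2]),
     (PySem.Dict.empty).insert "title" (PySem.Str.strip (PySem.Str.replace line "- Title:" "")))
  else if PySem.Str.startswith line "- Description:" then
    (st.1, st.2.insert "description" (PySem.Str.strip (PySem.Str.replace line "- Description:" "")))
  else if PySem.Str.startswith line "- Difficulty:" then
    (st.1, st.2.insert "implementation_difficulty" (PySem.Str.strip (PySem.Str.replace line "- Difficulty:" "")))
  else if PySem.Str.startswith line "- Category:" then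
    (st.1, st.2.insert "category" (PySem.Str.strip (PySem.Str.replace line "- Category:" "")))
  else if PySem.Str.startswith line "- Impact:" then
    (st.1, st.2.insert "estimated_impact" (PySem.Str.strip (PySem.Str.replace line "- Impact:" "")))
  else st

def parse_improvements_py (text : String) : List (List (String × String)) :=
  -- text.split('\n'): the separator is nonempty, so split? is always `some`
  let lines := (PySem.Str.split? text "\n").getD []
  let st := lines.foldl pvAStep ([], PySem.Dict.empty)
  let improvements := if st.2.items = [] then st.1 else st.1 ++ [st.2]
  improvements.map (·.items)

-- ===== PORT B =====
def pvFields : List (String × String) :=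
  [("- Title:", "title"), ("- Description:", "description"),
   ("- Difficulty:", "implementation_difficulty"), ("- Category:", "category"),
   ("- Impact:", "estimated_impact")]

-- inner `for prefix, key in FIELDS: … break` loop of build
def pvBuildLine (d : PySem.Dict String String) (line : String) : PySem.Dict String String :=
  match pvFields.find? (fun pk => PySem.Str.startswith line pk.1) with
  | some (pref, key) => d.insert key (PySem.Str.strip (PySem.Str.replace line pref ""))
  | none => d

def pvBuild (g : List String) : PySem.Dict String String :=
  g.foldl pvBuildLine PySem.Dict.empty

-- grouping loop body: state = (finished groups, current group)
def pvGStep (st : List (List String) × List String) (raw : String) :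
    List (List String) × List String :=
  let line := PySem.Str.strip raw
  if PySem.Str.startswith line "- Title:" then (st.1 ++ [st.2], [line])
  else (st.1, st.2 ++ [line])

-- `[lead] if lead else []`
def pvEmit (d : PySem.Dict String String) : List (PySem.Dict String String) :=
  if d.items = [] then [] else [d]

def pvBFinish (st : List (List String) × List String) : List (PySem.Dict String String) :=
  let groups := st.1 ++ [st.2]
  let lead := pvBuild (groups.headD [])
  pvEmit lead ++ groups.tail.map pvBuild

def parse_improvements_py_alt (text : String) : List (List (String × String)) :=
  let lines := (PySem.Str.split? text "\n").getD []
  (pvBFinish (lines.foldl pvGStep ([], []))).map (·.items)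

-- ===== PRECONDITION & SPEC =====
def Spec_parse_improvements_py (text : String) (out : List (List (String × String))) : Prop := out = parse_improvements_py_alt text
instance (text : String) (out : List (List (String × String))) : Decidable (Spec_parse_improvements_py text out) := by unfold Spec_parse_improvements_py; infer_instance

-- ===== CLAIM (what is proved, stated in full; the proofs are below) =====
def Claim_equal_parse_improvements_py : Prop := ∀ (text : String), Dom_parse_improvements_py text → Spec_parse_improvements_py text (parse_improvements_py text)

-- ===== LEMMAS AND PROOFS =====

-- common recursive reference: process raw lines, flushing the current dict at each title if nonempty
def pvRecL (d : PySem.Dict String String) : List String → List (PySem.Dict String String)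
  | [] => pvEmit d
  | l :: ls =>
    if PySem.Str.startswith (PySem.Str.strip l) "- Title:" = true then
      pvEmit d ++ pvRecL (pvBuildLine PySem.Dict.empty (PySem.Str.strip l)) ls
    else pvRecL (pvBuildLine d (PySem.Str.strip l)) ls

-- variant for title-started records: the current dict is always emitted at the end
def pvRecT (d : PySem.Dict String String) : List String → List (PySem.Dict String String)
  | [] => [d]
  | l :: ls =>
    if PySem.Str.startswith (PySem.Str.strip l) "- Title:" = true then
      d :: pvRecT (pvBuildLine PySem.Dict.empty (PySem.Str.strip l)) ls
    else pvRecT (pvBuildLine d (PySem.Str.strip l)) ls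

lemma pvBuildLine_eq (d : PySem.Dict String String) (s : String) :
    pvBuildLine d s =
      if PySem.Str.startswith s "- Title:" then
        d.insert "title" (PySem.Str.strip (PySem.Str.replace s "- Title:" ""))
      else if PySem.Str.startswith s "- Description:" then
        d.insert "description" (PySem.Str.strip (PySem.Str.replace s "- Description:" ""))
      else if PySem.Str.startswith s "- Difficulty:" then
        d.insert "implementation_difficulty" (PySem.Str.strip (PySem.Str.replace s "- Difficulty:" ""))
      else if PySem.Str.startswith s "- Category:" then
        d.insert "category" (PySem.Str.strip (PySem.Str.replace s "- Category:" ""))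
      else if PySem.Str.startswith s "- Impact:" then
        d.insert "estimated_impact" (PySem.Str.strip (PySem.Str.replace s "- Impact:" ""))
      else d := by
  cases h1 : PySem.Str.startswith s "- Title:" <;>
  cases h2 : PySem.Str.startswith s "- Description:" <;>
  cases h3 : PySem.Str.startswith s "- Difficulty:" <;>
  cases h4 : PySem.Str.startswith s "- Category:" <;>
  cases h5 : PySem.Str.startswith s "- Impact:" <;>
  simp only [PySem.Str.startswith_eq] at h1 h2 h3 h4 h5 <;>
  simp only [pvBuildLine, pvFields, List.find?, PySem.Str.startswith_eq, h1, h2, h3, h4, h5] <;> simp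

-- A's loop body, rephrased through B's per-line update
lemma pvAStep_eq (acc : List (PySem.Dict String String)) (d : PySem.Dict String String)
    (raw : String) :
    pvAStep (acc, d) raw =
      if PySem.Str.startswith (PySem.Str.strip raw) "- Title:" = true then
        (acc ++ pvEmit d, pvBuildLine PySem.Dict.empty (PySem.Str.strip raw))
      else (acc, pvBuildLine d (PySem.Str.strip raw)) := by
  rw [pvBuildLine_eq, pvBuildLine_eq]
  unfold pvAStep pvEmit
  cases h1 : PySem.Str.startswith (PySem.Str.strip raw) "- Title:" <;>
  cases h2 : PySem.Str.startswith (PySem.Str.strip raw) "- Description:" <;>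
  cases h3 : PySem.Str.startswith (PySem.Str.strip raw) "- Difficulty:" <;>
  cases h4 : PySem.Str.startswith (PySem.Str.strip raw) "- Category:" <;>
  cases h5 : PySem.Str.startswith (PySem.Str.strip raw) "- Impact:" <;>
  simp only [h1, h2, h3, h4, h5, Bool.false_eq_true, if_false, if_true] <;>
  split_ifs <;> simp_all

lemma pvInsert_items_ne_nil (d : PySem.Dict String String) (k v : String) :
    (d.insert k v).items ≠ [] := by
  rw [PySem.Dict.items_insert]
  by_cases h : d.contains k = true
  · simp only [h, if_true]
    intro hmap
    have hnil : d.items = [] := by simpa using hmap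
    have hc : d.contains k = false := by
      have hk : d.keys = [] := by simp [PySem.Dict.keys, hnil]
      rcases hcc : d.contains k with _ | _
      · rfl
      · exact absurd ((PySem.Dict.contains_iff_mem_keys d k).mp hcc) (by simp [hk])
    simp [hc] at h
  · simp [h]

lemma pvBuildLine_items_ne_nil (d : PySem.Dict String String) (s : String)
    (h : d.items ≠ []) : (pvBuildLine d s).items ≠ [] := by
  unfold pvBuildLine
  cases hf : pvFields.find? (fun pk => PySem.Str.startswith s pk.1) with
  | none => simpa using h
  | some pk => cases pk; simpa using pvInsert_items_ne_nil _ _ _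

lemma pvBuildLine_title_items_ne_nil (d : PySem.Dict String String) (s : String)
    (ht : PySem.Str.startswith s "- Title:" = true) : (pvBuildLine d s).items ≠ [] := by
  rw [pvBuildLine_eq]
  simp only [ht, if_true]
  exact pvInsert_items_ne_nil _ _ _

-- A's fold computes pvRecL
lemma pvA_fold_eq (ls : List String) (acc : List (PySem.Dict String String))
    (d : PySem.Dict String String) :
    (if (ls.foldl pvAStep (acc, d)).2.items = [] then (ls.foldl pvAStep (acc, d)).1
     else (ls.foldl pvAStep (acc, d)).1 ++ [(ls.foldl pvAStep (acc, d)).2]) =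
      acc ++ pvRecL d ls := by
  induction ls generalizing acc d with
  | nil =>
    simp only [List.foldl_nil, pvRecL, pvEmit]
    split_ifs <;> simp
  | cons l ls ih =>
    simp only [List.foldl_cons, pvAStep_eq, pvRecL]
    by_cases ht : PySem.Str.startswith (PySem.Str.strip l) "- Title:" = true
    · rw [if_pos ht, if_pos ht, ih]
      simp [List.append_assoc]
    · rw [if_neg ht, if_neg ht, ih]

-- pvRecL = pvRecT once the current dict is nonempty
lemma pvRecL_eq_pvRecT (ls : List String) (d : PySem.Dict String String)
    (h : d.items ≠ []) : pvRecL d ls = pvRecT d ls := by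
  induction ls generalizing d with
  | nil => simp [pvRecL, pvRecT, pvEmit, h]
  | cons l ls ih =>
    simp only [pvRecL, pvRecT]
    by_cases ht : PySem.Str.startswith (PySem.Str.strip l) "- Title:" = true
    · rw [if_pos ht, if_pos ht, ih _ (pvBuildLine_title_items_ne_nil _ _ ht)]
      simp [pvEmit, h]
    · rw [if_neg ht, if_neg ht]
      exact ih _ (pvBuildLine_items_ne_nil _ _ h)

-- B's fold, once the leading group is closed, computes pvRecT
lemma pvB_fold_eq_T (ls : List String) (g : List String)
    (rest : List (List String)) (cur : List String) :
    pvBFinish (ls.foldl pvGStep (g :: rest, cur)) =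
      pvEmit (pvBuild g) ++ rest.map pvBuild ++ pvRecT (pvBuild cur) ls := by
  induction ls generalizing rest cur with
  | nil => simp [pvBFinish, pvRecT]
  | cons l ls ih =>
    simp only [List.foldl_cons, pvGStep, pvRecT]
    by_cases ht : PySem.Str.startswith (PySem.Str.strip l) "- Title:" = true
    · rw [if_pos ht, if_pos ht]
      rw [show (g :: rest) ++ [cur] = g :: (rest ++ [cur]) from rfl, ih]
      simp [pvBuild, List.append_assoc]
    · rw [if_neg ht, if_neg ht, ih]
      simp [pvBuild, List.foldl_append]

-- B's fold in the leading phase computes pvRecL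
lemma pvB_fold_eq_L (ls : List String) (cur : List String) :
    pvBFinish (ls.foldl pvGStep ([], cur)) = pvRecL (pvBuild cur) ls := by
  induction ls generalizing cur with
  | nil => simp [pvBFinish, pvRecL]
  | cons l ls ih =>
    simp only [List.foldl_cons, pvGStep, pvRecL]
    by_cases ht : PySem.Str.startswith (PySem.Str.strip l) "- Title:" = true
    · rw [if_pos ht, if_pos ht]
      rw [show ([] : List (List String)) ++ [cur] = [cur] from rfl]
      rw [pvB_fold_eq_T ls cur [] [PySem.Str.strip l]]
      rw [pvRecL_eq_pvRecT ls _ (pvBuildLine_title_items_ne_nil _ _ ht)]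
      simp [pvBuild]
    · rw [if_neg ht, if_neg ht, ih]
      simp [pvBuild, List.foldl_append]

-- ===== VERDICT (by name: the statement is the Claim_ definition above) =====
theorem parse_improvements_py_spec : Claim_equal_parse_improvements_py := by
  intro text _
  unfold Spec_parse_improvements_py
  simp only [parse_improvements_py, parse_improvements_py_alt]
  rw [pvB_fold_eq_L]
  have hA := pvA_fold_eq ((PySem.Str.split? text "\n").getD []) [] PySem.Dict.empty
  simp only [List.nil_append] at hA
  rw [hA]
  rfl
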